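-- pv_equiv track=rewrite | github.com/sai-advaith/guided_alphafold | src/utils/process_pipeline_inputs/fix_pdb.py | find_sequence_start
-- ===== SOURCE A (Python) =====
-- def find_sequence_start(chain_residues, seq, window_size=8, min_matches=5):
--     """
--     Find where the chain starts in the SEQRES sequence.
--
--     Takes a window from the beginning of the modeled chain and finds
--     the best match in the SEQRES sequence.
--     """
--     if len(chain_residues) < window_size:
--         window_size = len(chain_residues)
--
--     # Take window from start of modeled chain
--     chain_window = chain_residues[:window_size]
--
--     best_pos = None
--     best_match_length = 0
--
--     # Try all positions in the SEQRES sequence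
--     for seq_pos in range(len(seq) - window_size + 1):
--         # Count consecutive matches from this position
--         match_length = 0
--         for i in range(min(window_size, len(seq) - seq_pos)):
--             if seq_pos + i < len(seq) and chain_window[i] == seq[seq_pos + i]:
--                 match_length += 1
--             else:
--                 break  # Stop at first mismatch for consecutive counting
--
--         # Update best match if this one is better
--         if match_length >= min_matches and match_length > best_match_length:
--             best_match_length = match_length
--             best_pos = seq_pos
--
--     return best_pos
-- ===== SOURCE B (Python) =====
-- def find_sequence_start(chain_residues, seq, window_size=8, min_matches=5):
--     """Sieve by rounds: keep the candidate start positions whose match with the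
--     chain window is still consecutive, extending the matched length one column
--     at a time until no candidate survives or the window is exhausted."""
--     if window_size > len(chain_residues):
--         window_size = len(chain_residues)
--     cand = list(range(len(seq) - window_size + 1))
--     k = 0
--     while k < window_size:
--         survivors = [p for p in cand if chain_residues[k] == seq[p + k]]
--         if not survivors:
--             break
--         cand = survivors
--         k += 1
--     if cand and k >= min_matches and k > 0:
--         return cand[0]
--     return None
-- ===== Notes on version B (the rewrite author's own statement) =====
-- stated objective: alternative
-- what changed: Replaces the per-position inner break-loop with a sieve over candidate start positions: one column at a time, positions whose consecutive match still extends survive, so the final round count is the best match length and the first surviving position is the answer.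
import Mathlib
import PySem

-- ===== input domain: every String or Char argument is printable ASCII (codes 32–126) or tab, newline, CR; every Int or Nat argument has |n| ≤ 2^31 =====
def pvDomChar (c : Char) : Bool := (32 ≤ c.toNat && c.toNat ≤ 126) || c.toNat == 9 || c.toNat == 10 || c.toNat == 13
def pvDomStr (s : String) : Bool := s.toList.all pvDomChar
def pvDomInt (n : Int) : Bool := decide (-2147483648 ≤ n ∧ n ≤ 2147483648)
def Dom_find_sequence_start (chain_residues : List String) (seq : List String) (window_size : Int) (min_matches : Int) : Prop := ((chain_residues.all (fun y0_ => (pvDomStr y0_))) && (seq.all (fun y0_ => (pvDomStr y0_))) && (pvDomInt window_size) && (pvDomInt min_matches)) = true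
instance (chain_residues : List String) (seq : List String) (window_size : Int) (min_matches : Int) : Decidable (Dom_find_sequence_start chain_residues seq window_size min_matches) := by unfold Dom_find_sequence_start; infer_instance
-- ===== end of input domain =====

-- B replaces A's per-position inner break-loop with a column-by-column sieve of candidate
-- start positions (objective: alternative algorithm of the same worst-case cost).

-- ===== PORT A =====
-- inner 'for i in range(...): ... else: break' loop; 'break' = returning the accumulator.
-- Indexing uses pyGetD: both subscripts are in range whenever they are evaluated
-- (i < window_size ≤ len(chain_window) would be needed only when the guard holds).
def fssInner (chain_window : List String) (seq : List String) (seq_pos : Int) :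
    List Int → Int → Int
  | [], ml => ml
  | i :: rest, ml =>
      if seq_pos + i < (seq.length : Int) ∧
         PySem.List.pyGetD chain_window i "" = PySem.List.pyGetD seq (seq_pos + i) "" then
        fssInner chain_window seq seq_pos rest (ml + 1)
      else ml

def find_sequence_start (chain_residues : List String) (seq : List String) (window_size : Int) (min_matches : Int) : Option Int :=
  let window_size := if (chain_residues.length : Int) < window_size then (chain_residues.length : Int) else window_size
  let chain_window := PySem.List.slice chain_residues none (some window_size)
  -- match_length (the same fssInner call) is written inline at its three uses
  ((PySem.List.pyRange 0 ((seq.length : Int) - window_size + 1) 1).foldl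
    (fun (st : Option Int × Int) seq_pos =>
      if min_matches ≤ fssInner chain_window seq seq_pos
           (PySem.List.pyRange 0 (min window_size ((seq.length : Int) - seq_pos)) 1) 0 ∧
         st.2 < fssInner chain_window seq seq_pos
           (PySem.List.pyRange 0 (min window_size ((seq.length : Int) - seq_pos)) 1) 0 then
        (some seq_pos,
         fssInner chain_window seq seq_pos
           (PySem.List.pyRange 0 (min window_size ((seq.length : Int) - seq_pos)) 1) 0)
      else st)
    ((none : Option Int), (0 : Int))).1

-- ===== PORT B =====
-- the 'while k < window_size' sieve loop of Source B
def fssSieve (chain_residues : List String) (seq : List String) (window_size : Int)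
    (cand : List Int) (k : Int) : List Int × Int :=
  if h : k < window_size then
    let survivors := cand.filter (fun p =>
      PySem.List.pyGetD chain_residues k "" == PySem.List.pyGetD seq (p + k) "")
    if survivors = [] then (cand, k)
    else fssSieve chain_residues seq window_size survivors (k + 1)
  else (cand, k)
  termination_by (window_size - k).toNat
  decreasing_by omega

def find_sequence_start_alt (chain_residues : List String) (seq : List String) (window_size : Int) (min_matches : Int) : Option Int :=
  let window_size := if window_size > (chain_residues.length : Int) then (chain_residues.length : Int) else window_size
  let res := fssSieve chain_residues seq window_size
    (PySem.List.pyRange 0 ((seq.length : Int) - window_size + 1) 1) 0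
  if res.1 ≠ [] ∧ min_matches ≤ res.2 ∧ 0 < res.2 then res.1.head? else none

-- ===== PRECONDITION & SPEC =====
def Spec_find_sequence_start (chain_residues : List String) (seq : List String) (window_size : Int) (min_matches : Int) (out : Option Int) : Prop := out = find_sequence_start_alt chain_residues seq window_size min_matches
instance (chain_residues : List String) (seq : List String) (window_size : Int) (min_matches : Int) (out : Option Int) : Decidable (Spec_find_sequence_start chain_residues seq window_size min_matches out) := by unfold Spec_find_sequence_start; infer_instance

-- ===== CLAIM (what is proved, stated in full; the proofs are below) =====
def Claim_equal_find_sequence_start : Prop := ∀ (chain_residues : List String) (seq : List String) (window_size : Int) (min_matches : Int), Dom_find_sequence_start chain_residues seq window_size min_matches → Spec_find_sequence_start chain_residues seq window_size min_matches (find_sequence_start chain_residues seq window_size min_matches)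

-- ===== LEMMAS AND PROOFS =====

-- length of the longest common prefix of two lists
def lcpLen : List String → List String → Nat
  | a :: as, b :: bs => if a = b then lcpLen as bs + 1 else 0
  | _, _ => 0

theorem lcpLen_le_left (as bs : List String) : lcpLen as bs ≤ as.length := by
  induction as generalizing bs with
  | nil => cases bs <;> simp [lcpLen]
  | cons a as ih =>
    cases bs with
    | nil => simp [lcpLen]
    | cons b bs =>
      by_cases h : a = b <;> simp [lcpLen, h]
      exact ih bs

theorem lcpLen_succ_iff (as bs : List String) (k : Nat)
    (h1 : k < as.length) (h2 : k < bs.length) :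
    k + 1 ≤ lcpLen as bs ↔ k ≤ lcpLen as bs ∧ as.getD k "" = bs.getD k "" := by
  induction k generalizing as bs with
  | zero =>
    cases as with
    | nil => simp at h1
    | cons a as =>
      cases bs with
      | nil => simp at h2
      | cons b bs =>
        by_cases h : a = b <;> simp [lcpLen, h]
  | succ k ih =>
    cases as with
    | nil => simp at h1
    | cons a as =>
      cases bs with
      | nil => simp at h2
      | cons b bs =>
        by_cases h : a = b
        · simp only [lcpLen, if_pos h, List.getD_cons_succ]
          constructor
          · intro hk
            have := (ih as bs (by simpa using h1) (by simpa using h2)).mp (by omega)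
            exact ⟨by omega, this.2⟩
          · intro ⟨hk, he⟩
            have := (ih as bs (by simpa using h1) (by simpa using h2)).mpr ⟨by omega, he⟩
            omega
        · simp [lcpLen, h]

theorem foldl_max_pair (f : Int → Int) (l : List Int) (a b : Int) :
    l.foldl (fun acc p => max acc (f p)) (max a b) = max a (l.foldl (fun acc p => max acc (f p)) b) := by
  induction l generalizing b with
  | nil => rfl
  | cons p l ih =>
    simp only [List.foldl_cons]
    rw [max_assoc, ih]

theorem foldl_max_start_le (f : Int → Int) (l : List Int) (a : Int) :
    a ≤ l.foldl (fun acc p => max acc (f p)) a := by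
  induction l generalizing a with
  | nil => simp
  | cons p l ih => exact le_trans (le_max_left a (f p)) (ih _)

theorem foldl_max_elem_le (f : Int → Int) (l : List Int) (a x : Int) (hx : x ∈ l) :
    f x ≤ l.foldl (fun acc p => max acc (f p)) a := by
  induction l generalizing a with
  | nil => simp at hx
  | cons p l ih =>
    simp only [List.mem_cons] at hx
    rcases hx with rfl | hx
    · exact le_trans (le_max_right a (f x)) (foldl_max_start_le f l _)
    · exact ih _ hx

theorem foldl_max_le (f : Int → Int) (l : List Int) (a c : Int)
    (ha : a ≤ c) (h : ∀ x ∈ l, f x ≤ c) :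
    l.foldl (fun acc p => max acc (f p)) a ≤ c := by
  induction l generalizing a with
  | nil => simpa
  | cons p l ih =>
    exact ih _ (max_le ha (h p (by simp))) (fun x hx => h x (List.mem_cons_of_mem _ hx))

theorem foldl_max_attain (f : Int → Int) (l : List Int) (a : Int) :
    l.foldl (fun acc p => max acc (f p)) a = a ∨
    ∃ x ∈ l, l.foldl (fun acc p => max acc (f p)) a = f x := by
  induction l generalizing a with
  | nil => left; rfl
  | cons p l ih =>
    simp only [List.foldl_cons]
    rcases ih (max a (f p)) with h | ⟨x, hx, hfx⟩
    · rcases max_choice a (f p) with hm | hm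
      · left; rw [h, hm]
      · right; exact ⟨p, List.mem_cons_self, by rw [h, hm]⟩
    · right; exact ⟨x, List.mem_cons_of_mem _ hx, hfx⟩

-- characterisation of A's best-so-far fold: first position attaining the maximum
theorem foldA_char (f : Int → Int) (mm : Int) (l : List Int) (b : Option Int) (v : Int) :
    l.foldl (fun st p => if mm ≤ f p ∧ st.2 < f p then (some p, f p) else st) (b, v)
    = (if v < l.foldl (fun acc p => max acc (f p)) v ∧ mm ≤ l.foldl (fun acc p => max acc (f p)) v
       then (l.find? (fun p => decide (f p = l.foldl (fun acc p => max acc (f p)) v)),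
             l.foldl (fun acc p => max acc (f p)) v)
       else (b, v)) := by
  induction l generalizing b v with
  | nil => simp
  | cons p l ih =>
    simp only [List.foldl_cons]
    by_cases h1 : mm ≤ f p ∧ v < f p
    · rw [if_pos h1]
      rw [ih (some p) (f p)]
      have hmax : max v (f p) = f p := max_eq_right (le_of_lt h1.2)
      have hle : f p ≤ l.foldl (fun acc p => max acc (f p)) (f p) := foldl_max_start_le f l _
      simp only [hmax]
      set Mx := l.foldl (fun acc p => max acc (f p)) (f p) with hMx
      have hcond : v < Mx ∧ mm ≤ Mx := ⟨lt_of_lt_of_le h1.2 hle, le_trans h1.1 hle⟩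
      rw [if_pos hcond]
      by_cases he : f p = Mx
      · rw [if_neg (by omega), List.find?_cons_of_pos (by simp [he])]
        simp [he]
      · rw [if_pos ⟨by omega, hcond.2⟩, List.find?_cons_of_neg (by simp [he])]
    · rw [if_neg h1]
      rw [ih b v]
      by_cases h2 : f p ≤ v
      · have hmax : max v (f p) = v := max_eq_left h2
        simp only [hmax]
        set Mxv := l.foldl (fun acc p => max acc (f p)) v with hMxv
        by_cases hc : v < Mxv ∧ mm ≤ Mxv
        · have h2' : f p ≤ v := h2
          obtain ⟨hc1, hc2⟩ := hc
          rw [if_pos ⟨hc1, hc2⟩, if_pos ⟨hc1, hc2⟩,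
            List.find?_cons_of_neg (by simp; omega)]
        · rw [if_neg hc, if_neg hc]
      · rw [not_le] at h2
        have hmm : ¬ mm ≤ f p := fun hmm => h1 ⟨hmm, h2⟩
        have hmax : max v (f p) = f p := max_eq_right (le_of_lt h2)
        simp only [hmax]
        set Mxv := l.foldl (fun acc p => max acc (f p)) v with hMxv
        set Mx := l.foldl (fun acc p => max acc (f p)) (f p) with hMx
        have hsplit : Mx = max (f p) Mxv := by
          rw [hMx, hMxv, ← foldl_max_pair]
          congr 1
          omega
        have hvle : v ≤ Mxv := foldl_max_start_le f l v
        by_cases hc : mm ≤ Mxv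
        · have hfp : f p < mm := by omega
          have hMxeq : Mx = Mxv := by omega
          rw [hMxeq, if_pos ⟨by omega, hc⟩, if_pos ⟨by omega, hc⟩,
            List.find?_cons_of_neg (by simp; omega)]
        · have hnc : ¬ mm ≤ Mx := by omega
          rw [if_neg (by omega), if_neg (by omega)]

-- capped consecutive match length at position p, as an Int
def mval (chain seq : List String) (w : Nat) (p : Int) : Int :=
  (lcpLen (chain.take w) (seq.drop p.toNat) : Int)

theorem mval_nonneg (chain seq : List String) (w : Nat) (p : Int) :
    0 ≤ mval chain seq w p := by simp [mval]

theorem mval_le (chain seq : List String) (w : Nat) (hwc : w ≤ chain.length) (p : Int) :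
    mval chain seq w p ≤ (w : Int) := by
  have h := lcpLen_le_left (chain.take w) (seq.drop p.toNat)
  have hl : (chain.take w).length = w := by simp [hwc]
  rw [hl] at h
  simpa [mval] using h

-- A's inner break loop, started at column j, computes j + the remaining common prefix
theorem inner_go (chain seq : List String) (w : Nat) (hw : w ≤ chain.length)
    (p : Int) (hp : 0 ≤ p) (hpn : p.toNat + w ≤ seq.length) :
    ∀ (r j : Nat), j + r = w →
      fssInner (chain.take w) seq p ((List.range' j r).map (Nat.cast : Nat → Int)) (j : Int)
        = (j : Int) + (lcpLen ((chain.take w).drop j) (seq.drop (p.toNat + j)) : Nat) := by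
  intro r
  induction r with
  | zero =>
    intro j hj
    have hnil : (chain.take w).drop j = [] := by
      apply List.drop_eq_nil_of_le
      simp
      omega
    simp [fssInner, hnil, lcpLen]
  | succ r ih =>
    intro j hj
    have hjw : j < w := by omega
    have hjc : j < (chain.take w).length := by simp; omega
    have hjs : p.toNat + j < seq.length := by omega
    rw [List.range'_succ, List.map_cons]
    have hcast : p + (j : Int) = ((p.toNat + j : Nat) : Int) := by omega
    have hgd1 : (chain.take w).getD j "" = (chain.take w)[j] := List.getD_eq_getElem _ _ hjc
    have hgd2 : seq.getD (p.toNat + j) "" = seq[p.toNat + j] := List.getD_eq_getElem _ _ hjs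
    have hCW : (chain.take w).drop j = (chain.take w)[j] :: (chain.take w).drop (j + 1) :=
      List.drop_eq_getElem_cons hjc
    have hseq : seq.drop (p.toNat + j) = seq[p.toNat + j] :: seq.drop (p.toNat + j + 1) :=
      List.drop_eq_getElem_cons hjs
    by_cases heq : (chain.take w)[j] = seq[p.toNat + j]
    · rw [fssInner, if_pos]
      · have hstep := ih (j + 1) (by omega)
        rw [show ((j : Int) + 1 = ((j + 1 : Nat) : Int)) by push_cast; ring] at *
        have hidx : p.toNat + (j + 1) = p.toNat + j + 1 := by omega
        rw [hidx] at hstep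
        rw [hstep, hCW, hseq, lcpLen, if_pos heq]
        push_cast
        ring
      · constructor
        · omega
        · rw [hcast]
          simp only [PySem.List.pyGetD_natCast]
          rw [hgd1, hgd2]
          exact heq
    · rw [fssInner, if_neg]
      · rw [hCW, hseq, lcpLen, if_neg heq]
        simp
      · intro ⟨_, hc⟩
        rw [hcast] at hc
        simp only [PySem.List.pyGetD_natCast] at hc
        rw [hgd1, hgd2] at hc
        exact heq hc

theorem inner_eq (chain seq : List String) (w : Nat) (hw : w ≤ chain.length)
    (p : Int) (hp : 0 ≤ p) (hpn : p.toNat + w ≤ seq.length) :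
    fssInner (chain.take w) seq p (PySem.List.pyRange 0 (w : Int) 1) 0
      = mval chain seq w p := by
  have hr : PySem.List.pyRange 0 (w : Int) 1 = (List.range' 0 w).map (Nat.cast : Nat → Int) := by
    rw [PySem.List.pyRange_one]
    simp [List.range_eq_range']
  rw [hr]
  have h0 := inner_go chain seq w hw p hp hpn w 0 (by omega)
  simpa [mval] using h0

-- one-step unfoldings of the sieve loop
theorem fssSieve_stop (c s : List String) (ws : Int) (cand : List Int) (k : Int)
    (h : ¬ k < ws) : fssSieve c s ws cand k = (cand, k) := by
  rw [fssSieve]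
  simp [h]

theorem fssSieve_step (c s : List String) (ws : Int) (cand : List Int) (k : Int)
    (h : k < ws) :
    fssSieve c s ws cand k =
      (if cand.filter (fun p => PySem.List.pyGetD c k "" == PySem.List.pyGetD s (p + k) "") = []
       then (cand, k)
       else fssSieve c s ws
         (cand.filter (fun p => PySem.List.pyGetD c k "" == PySem.List.pyGetD s (p + k) "")) (k + 1)) := by
  rw [fssSieve]
  simp [h]

-- the candidate position list and the best (maximum) match length
def posList (seq : List String) (w : Nat) : List Int :=
  PySem.List.pyRange 0 ((seq.length : Int) - (w : Int) + 1) 1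

def bigM (chain seq : List String) (w : Nat) : Int :=
  (posList seq w).foldl (fun acc p => max acc (mval chain seq w p)) 0

theorem mem_posList (seq : List String) (w : Nat) (p : Int) :
    p ∈ posList seq w ↔ 0 ≤ p ∧ p < (seq.length : Int) - (w : Int) + 1 := by
  rw [posList, PySem.List.mem_pyRange_one]

-- one sieve round refines 'k columns match' to 'k+1 columns match'
theorem step_filter (chain seq : List String) (w : Nat) (hwc : w ≤ chain.length)
    (k : Nat) (hk : k < w) :
    ((posList seq w).filter (fun p => decide ((k : Int) ≤ mval chain seq w p))).filter
      (fun p => PySem.List.pyGetD chain (k : Int) "" == PySem.List.pyGetD seq (p + (k : Int)) "")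
    = (posList seq w).filter (fun p => decide ((k : Int) + 1 ≤ mval chain seq w p)) := by
  rw [List.filter_filter]
  apply List.filter_congr
  intro p hp
  obtain ⟨hp0, hplt⟩ := (mem_posList seq w p).mp hp
  have hkc : k < (chain.take w).length := by simp; omega
  have hks : k < (seq.drop p.toNat).length := by simp; omega
  have hcast : p + (k : Int) = ((p.toNat + k : Nat) : Int) := by omega
  rw [hcast]
  simp only [PySem.List.pyGetD_natCast]
  have h1 : chain.getD k "" = (chain.take w).getD k "" := by
    rw [List.getD_eq_getElem?_getD, List.getD_eq_getElem?_getD, List.getElem?_take_of_lt hk]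
  have h2 : seq.getD (p.toNat + k) "" = (seq.drop p.toNat).getD k "" := by
    rw [List.getD_eq_getElem?_getD, List.getD_eq_getElem?_getD, List.getElem?_drop]
  have key := lcpLen_succ_iff (chain.take w) (seq.drop p.toNat) k hkc hks
  have key2 : ((k : Int) + 1 ≤ mval chain seq w p) ↔
      ((k : Int) ≤ mval chain seq w p ∧
        (chain.take w).getD k "" = (seq.drop p.toNat).getD k "") := by
    simp only [mval]
    constructor
    · intro h
      have h' : k + 1 ≤ lcpLen (chain.take w) (seq.drop p.toNat) := by exact_mod_cast h
      obtain ⟨ha, hb⟩ := key.mp h'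
      exact ⟨by exact_mod_cast ha, hb⟩
    · intro ⟨ha, hb⟩
      have ha' : k ≤ lcpLen (chain.take w) (seq.drop p.toNat) := by exact_mod_cast ha
      have := key.mpr ⟨ha', hb⟩
      exact_mod_cast this
  rw [Bool.eq_iff_iff]
  simp only [Bool.and_eq_true, decide_eq_true_eq, beq_iff_eq]
  rw [h1, h2]
  exact ⟨fun h => key2.mpr ⟨h.2, h.1⟩, fun h => ⟨(key2.mp h).2, (key2.mp h).1⟩⟩

-- the sieve loop, entered with the positions matching k columns, ends at the best length
theorem sieve_char (chain seq : List String) (w : Nat) (hwc : w ≤ chain.length)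
    (hwn : w ≤ seq.length) :
    ∀ (r k : Nat), k + r = w → (k : Int) ≤ bigM chain seq w →
      (posList seq w).filter (fun p => decide ((k : Int) ≤ mval chain seq w p)) ≠ [] →
      fssSieve chain seq (w : Int)
        ((posList seq w).filter (fun p => decide ((k : Int) ≤ mval chain seq w p))) (k : Int)
      = ((posList seq w).filter (fun p => decide (bigM chain seq w ≤ mval chain seq w p)),
         bigM chain seq w) := by
  intro r
  induction r with
  | zero =>
    intro k hk hkM hne
    have hkw : k = w := by omega
    subst hkw
    rw [fssSieve_stop _ _ _ _ _ (by omega)]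
    obtain ⟨p, hpmem⟩ := List.exists_mem_of_ne_nil _ hne
    obtain ⟨hpP, hpv⟩ := List.mem_filter.mp hpmem
    have hpv' : (k : Int) ≤ mval chain seq k p := by simpa using hpv
    have hMw : bigM chain seq k = (k : Int) := by
      apply le_antisymm
      · exact foldl_max_le _ _ _ _ (by positivity) (fun x _ => mval_le chain seq k hwc x)
      · exact le_trans hpv' (foldl_max_elem_le _ _ _ _ hpP)
    rw [hMw]
  | succ r ih =>
    intro k hk hkM hne
    have hkw : k < w := by omega
    rw [fssSieve_step _ _ _ _ _ (by exact_mod_cast hkw)]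
    rw [step_filter chain seq w hwc k hkw]
    by_cases hs : (posList seq w).filter (fun p => decide ((k : Int) + 1 ≤ mval chain seq w p)) = []
    · rw [if_pos hs]
      have hMk : bigM chain seq w = (k : Int) := by
        apply le_antisymm
        · rcases foldl_max_attain (mval chain seq w) (posList seq w) 0 with h0 | ⟨x, hx, hfx⟩
          · rw [bigM, h0]; positivity
          · by_contra hlt
            have hx1 : (k : Int) + 1 ≤ mval chain seq w x := by rw [bigM] at hlt; omega
            have : x ∈ (posList seq w).filter
                (fun p => decide ((k : Int) + 1 ≤ mval chain seq w p)) :=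
              List.mem_filter.mpr ⟨hx, by simpa using hx1⟩
            rw [hs] at this
            simp at this
        · exact hkM
      rw [hMk]
    · rw [if_neg hs]
      obtain ⟨p, hp⟩ := List.exists_mem_of_ne_nil _ hs
      obtain ⟨hpP, hpv⟩ := List.mem_filter.mp hp
      have hpv' : (k : Int) + 1 ≤ mval chain seq w p := by simpa using hpv
      have hk1M : (k : Int) + 1 ≤ bigM chain seq w :=
        le_trans hpv' (foldl_max_elem_le _ _ _ _ hpP)
      have hih := ih (k + 1) (by omega) (by push_cast; omega) (by push_cast; exact hs)
      rw [show ((k : Int) + 1 = ((k + 1 : Nat) : Int)) by push_cast; ring]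
      push_cast at hih ⊢
      exact hih

theorem filterM_ne_nil (chain seq : List String) (w : Nat) (h : posList seq w ≠ []) :
    (posList seq w).filter (fun p => decide (bigM chain seq w ≤ mval chain seq w p)) ≠ [] := by
  rcases foldl_max_attain (mval chain seq w) (posList seq w) 0 with h0 | ⟨x, hx, hfx⟩
  · obtain ⟨p, hp⟩ := List.exists_mem_of_ne_nil _ h
    intro hc
    have : p ∈ (posList seq w).filter (fun p => decide (bigM chain seq w ≤ mval chain seq w p)) :=
      List.mem_filter.mpr ⟨hp, by
        simp only [decide_eq_true_eq, bigM, h0]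
        exact mval_nonneg chain seq w p⟩
    rw [hc] at this
    simp at this
  · intro hc
    have : x ∈ (posList seq w).filter (fun p => decide (bigM chain seq w ≤ mval chain seq w p)) :=
      List.mem_filter.mpr ⟨hx, by simp only [decide_eq_true_eq, bigM, hfx]; exact le_refl _⟩
    rw [hc] at this
    simp at this

-- ===== VERDICT (by name: the statement is the Claim_ definition above) =====
theorem find_sequence_start_spec : Claim_equal_find_sequence_start := by
  intro chain seq ws mm _
  unfold Spec_find_sequence_start
  simp only [find_sequence_start, find_sequence_start_alt, gt_iff_lt]
  set wI : Int := if (chain.length : Int) < ws then (chain.length : Int) else ws with hwI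
  have hwIL : wI ≤ (chain.length : Int) := by rw [hwI]; split_ifs <;> omega
  by_cases hpos : wI ≤ 0
  · -- effective window ≤ 0: A's inner range and B's sieve both do nothing; both return none
    rw [foldA_char
      (fun p => fssInner (PySem.List.slice chain none (some wI)) seq p
        (PySem.List.pyRange 0 (min wI ((seq.length : Int) - p)) 1) 0) mm _ none 0]
    have hf : ∀ p : Int,
        fssInner (PySem.List.slice chain none (some wI)) seq p
          (PySem.List.pyRange 0 (min wI ((seq.length : Int) - p)) 1) 0 = 0 := by
      intro p
      have hr : PySem.List.pyRange 0 (min wI ((seq.length : Int) - p)) 1 = [] := by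
        rw [PySem.List.pyRange_one]
        rw [show (min wI ((seq.length : Int) - p) - 0).toNat = 0 by omega]
        rfl
      rw [hr]
      rfl
    simp only [hf]
    have hMx : List.foldl (fun (acc : Int) (_ : Int) => max acc 0) 0
        (PySem.List.pyRange 0 ((seq.length : Int) - wI + 1) 1) = 0 :=
      le_antisymm
        (foldl_max_le (fun _ => (0 : Int)) _ 0 0 le_rfl (fun _ _ => le_rfl))
        (foldl_max_start_le (fun _ => (0 : Int)) _ 0)
    rw [hMx, if_neg (by omega)]
    rw [fssSieve_stop _ _ _ _ _ (by omega)]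
    simp
  · rw [not_le] at hpos
    set w : Nat := wI.toNat with hw
    have hwI' : wI = (w : Int) := by omega
    have hwc : w ≤ chain.length := by omega
    rw [hwI']
    by_cases hnw : (seq.length : Int) - (w : Int) + 1 ≤ 0
    · -- seq shorter than the window: no candidate positions; both return none
      have hP : PySem.List.pyRange 0 ((seq.length : Int) - (w : Int) + 1) 1 = [] := by
        rw [PySem.List.pyRange_one]
        rw [show ((seq.length : Int) - (w : Int) + 1 - 0).toNat = 0 by omega]
        rfl
      rw [hP, fssSieve_step _ _ _ _ _ (by omega)]
      simp
    · -- main case: 1 ≤ w ≤ len(chain), w ≤ len(seq)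
      have hwn : w ≤ seq.length := by omega
      have hslice : PySem.List.slice chain none (some ((w : Nat) : Int)) = chain.take w := by
        rw [PySem.List.slice_to_natCast]
      rw [hslice]
      rw [foldA_char
        (fun p => fssInner (chain.take w) seq p
          (PySem.List.pyRange 0 (min ((w : Nat) : Int) ((seq.length : Int) - p)) 1) 0) mm _ none 0]
      have hPL : PySem.List.pyRange 0 ((seq.length : Int) - ((w : Nat) : Int) + 1) 1
          = posList seq w := rfl
      rw [hPL]
      have hfm : ∀ p ∈ posList seq w,
          fssInner (chain.take w) seq p
            (PySem.List.pyRange 0 (min ((w : Nat) : Int) ((seq.length : Int) - p)) 1) 0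
          = mval chain seq w p := by
        intro p hp
        obtain ⟨hp0, hplt⟩ := (mem_posList seq w p).mp hp
        rw [show min ((w : Nat) : Int) ((seq.length : Int) - p) = ((w : Nat) : Int) by omega]
        exact inner_eq chain seq w hwc p hp0 (by omega)
      have hfold : (posList seq w).foldl
          (fun acc p => max acc (fssInner (chain.take w) seq p
            (PySem.List.pyRange 0 (min ((w : Nat) : Int) ((seq.length : Int) - p)) 1) 0)) 0
          = bigM chain seq w := by
        rw [bigM]
        apply PySem.List.foldl_congr_mem
        intro acc x hx
        rw [hfm x hx]
      rw [hfold]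
      have hfind : (posList seq w).find? (fun p => decide (fssInner (chain.take w) seq p
            (PySem.List.pyRange 0 (min ((w : Nat) : Int) ((seq.length : Int) - p)) 1) 0
            = bigM chain seq w))
          = (posList seq w).find? (fun p => decide (bigM chain seq w ≤ mval chain seq w p)) := by
        rw [← List.head?_filter, ← List.head?_filter]
        congr 1
        apply List.filter_congr
        intro p hp
        have h1 := hfm p hp
        have h2 : mval chain seq w p ≤ bigM chain seq w :=
          foldl_max_elem_le _ _ _ _ hp
        rw [h1, decide_eq_decide]
        omega
      rw [hfind]
      have hPne : posList seq w ≠ [] := by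
        intro h
        have := congrArg List.length h
        rw [posList, PySem.List.length_pyRange_one] at this
        simp at this
        omega
      have hstart : posList seq w
          = (posList seq w).filter (fun p => decide ((((0 : Nat)) : Int) ≤ mval chain seq w p)) :=
        (List.filter_eq_self.mpr (fun p _ => by
          simpa using mval_nonneg chain seq w p)).symm
      have hsieve := sieve_char chain seq w hwc hwn w 0 (by omega)
        (by exact_mod_cast foldl_max_start_le (mval chain seq w) (posList seq w) 0)
        (by rw [← hstart]; exact hPne)
      have hsieve' : fssSieve chain seq ((w : Nat) : Int) (posList seq w) 0
          = ((posList seq w).filter (fun p => decide (bigM chain seq w ≤ mval chain seq w p)),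
             bigM chain seq w) := by
        conv_lhs => rw [hstart]
        simpa using hsieve
      rw [hsieve']
      have hne := filterM_ne_nil chain seq w hPne
      rw [List.head?_filter] at *
      by_cases hcond : mm ≤ bigM chain seq w ∧ 0 < bigM chain seq w
      · rw [if_pos ⟨hcond.2, hcond.1⟩, if_pos ⟨hne, hcond⟩]
      · rw [if_neg (by tauto), if_neg (by tauto)]
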